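-- pv_equiv track=rewrite | github.com/miliar/Code_Jam_Webscraper | solutions_python/solutions_year16_round1_nr1/595.py | last_word
-- ===== SOURCE A (Python) =====
-- def last_word(s):
--     word_list = [s[0]]
--     for char in s[1:]:
--         if char >= word_list[0]:
--             word_list.insert(0, char)
--         else:
--             word_list.append(char)
--     return ''.join(word_list)
-- ===== SOURCE B (Python) =====
-- def last_word(s):
--     # Staged passes: precompute prefix maxima, then partition s[1:] against them
--     # by zip, then assemble reverse(hi) + s[0] + lo. No insert(0), no branchy
--     # accumulator loop: A is O(n^2) from repeated front insertion, this is O(n).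
--     maxes = []
--     m = s[0]
--     for c in s:
--         m = max(m, c)
--         maxes.append(m)
--     hi = [c for pm, c in zip(maxes, s[1:]) if c >= pm]
--     lo = [c for pm, c in zip(maxes, s[1:]) if c < pm]
--     return ''.join(reversed(hi)) + s[0] + ''.join(lo)
-- ===== Notes on version B (the rewrite author's own statement) =====
-- stated objective: faster
-- what changed: B replaces A's single stateful loop with repeated insert(0) by staged passes: precompute the prefix-maximum array, partition the remaining characters against it with zip comprehensions, then assemble reverse(hi) + s[0] + lo; O(n) instead of A's O(n^2) front insertion.
import Mathlib
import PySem

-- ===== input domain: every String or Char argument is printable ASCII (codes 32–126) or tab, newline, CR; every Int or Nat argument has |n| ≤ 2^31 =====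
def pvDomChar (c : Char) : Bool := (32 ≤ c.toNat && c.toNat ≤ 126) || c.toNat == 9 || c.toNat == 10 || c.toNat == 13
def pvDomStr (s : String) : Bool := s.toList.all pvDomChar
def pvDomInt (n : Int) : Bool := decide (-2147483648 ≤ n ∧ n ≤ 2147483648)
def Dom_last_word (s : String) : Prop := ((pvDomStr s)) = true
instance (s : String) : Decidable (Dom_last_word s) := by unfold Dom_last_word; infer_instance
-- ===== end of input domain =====

-- B replaces A's repeated insert(0) loop by staged passes (prefix maxima, zip-partition, reverse-and-concatenate): O(n) instead of O(n^2).

-- ===== PORT A =====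
-- s[0]/s[1:] ported via the character list; word_list is nonempty throughout, so word_list[0] is wl.headD ' ' (default never used).
def last_word (s : String) : String :=
  match s.toList with
  | [] => ""   -- s[0] raises IndexError here; excluded by Pre_last_word
  | c0 :: rest =>
    String.mk (rest.foldl (fun wl c => if wl.headD ' ' ≤ c then c :: wl else wl ++ [c]) [c0])

-- ===== PORT B =====
def last_word_alt (s : String) : String :=
  match s.toList with
  | [] => ""   -- s[0] raises in Python; excluded by Pre_last_word
  | c0 :: cs =>
    let maxes := ((c0 :: cs).foldl
      (fun (st : Char × List Char) c =>
        let m := if st.1 ≤ c then c else st.1   -- max(m, c)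
        (m, st.2 ++ [m])) (c0, [])).2
    let hi := (maxes.zip cs).filterMap (fun p => if p.1 ≤ p.2 then some p.2 else none)
    let lo := (maxes.zip cs).filterMap (fun p => if p.2 < p.1 then some p.2 else none)
    String.mk (hi.reverse ++ c0 :: lo)

-- ===== PRECONDITION & SPEC =====
-- Pre_ excludes only the empty string, on which A raises IndexError at s[0].
def Pre_last_word (s : String) : Prop := s ≠ ""
instance (s : String) : Decidable (Pre_last_word s) := by unfold Pre_last_word; infer_instance
def pvWitness_last_word : String := "cab"
def Spec_last_word (s : String) (out : String) : Prop := out = last_word_alt s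
instance (s : String) (out : String) : Decidable (Spec_last_word s out) := by unfold Spec_last_word; infer_instance

-- ===== CLAIM (what is proved, stated in full; the proofs are below) =====
def Claim_equal_last_word : Prop := ∀ (s : String), Dom_last_word s → Pre_last_word s → Spec_last_word s (last_word s)

-- ===== LEMMAS AND PROOFS =====

-- records (in reverse-chronological order) and non-records of cs, given current maximum m
def hiRec : Char → List Char → List Char
  | _, [] => []
  | m, c :: cs => if m ≤ c then c :: hiRec c cs else hiRec m cs

def loRec : Char → List Char → List Char
  | _, [] => []
  | m, c :: cs => if m ≤ c then loRec c cs else c :: loRec m cs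

-- running-maximum scan
def pmScan : Char → List Char → List Char
  | _, [] => []
  | m, c :: cs => let m' := if m ≤ c then c else m; m' :: pmScan m' cs

-- B's maxes fold produces acc ++ pmScan m cs
theorem maxes_eq (cs : List Char) : ∀ (m : Char) (acc : List Char),
    (cs.foldl (fun (st : Char × List Char) c =>
        let m := if st.1 ≤ c then c else st.1
        (m, st.2 ++ [m])) (m, acc)).2 = acc ++ pmScan m cs := by
  induction cs with
  | nil => intro m acc; simp [pmScan]
  | cons c cs ih =>
    intro m acc
    simp only [List.foldl_cons, pmScan]
    rw [ih]
    simp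

-- zip-partition against the shifted prefix maxima = hiRec / loRec
theorem zip_hi (cs : List Char) : ∀ (m : Char),
    ((m :: pmScan m cs).zip cs).filterMap (fun p => if p.1 ≤ p.2 then some p.2 else none)
      = hiRec m cs := by
  induction cs with
  | nil => intro m; simp [hiRec]
  | cons c cs ih =>
    intro m
    simp only [pmScan, List.zip_cons_cons, List.filterMap_cons, hiRec]
    by_cases h : m ≤ c <;> simp [h, ih]

theorem zip_lo (cs : List Char) : ∀ (m : Char),
    ((m :: pmScan m cs).zip cs).filterMap (fun p => if p.2 < p.1 then some p.2 else none)
      = loRec m cs := by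
  induction cs with
  | nil => intro m; simp [loRec]
  | cons c cs ih =>
    intro m
    simp only [pmScan, List.zip_cons_cons, List.filterMap_cons, loRec]
    by_cases h : m ≤ c
    · simp [h, not_lt.mpr h, ih]
    · simp [h, not_le.mp h, ih]

-- A's loop: state is rfront ++ back with the current maximum at the head of rfront
theorem A_loop (cs : List Char) : ∀ (m : Char) (rfront back : List Char),
    rfront.head? = some m →
    cs.foldl (fun wl c => if wl.headD ' ' ≤ c then c :: wl else wl ++ [c]) (rfront ++ back)
      = (hiRec m cs).reverse ++ rfront ++ back ++ loRec m cs := by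
  induction cs with
  | nil => intro m rfront back _; simp [hiRec, loRec]
  | cons c cs ih =>
    intro m rfront back h
    obtain ⟨t, ht⟩ : ∃ t, rfront = m :: t := by
      cases rfront with
      | nil => simp at h
      | cons x xs => simp at h; exact ⟨xs, by rw [h]⟩
    have hhead : (rfront ++ back).headD ' ' = m := by rw [ht]; simp
    simp only [List.foldl_cons, hhead, hiRec, loRec]
    by_cases hc : m ≤ c
    · have h1 : (c :: (rfront ++ back)) = (c :: rfront) ++ back := by simp
      simp only [hc, if_pos, h1]
      rw [ih c (c :: rfront) back (by simp)]
      simp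
    · have h1 : (rfront ++ back) ++ [c] = rfront ++ (back ++ [c]) := by simp
      simp only [hc, if_neg, not_false_iff, h1]
      rw [ih m rfront (back ++ [c]) (ht ▸ rfl)]
      simp

-- ===== VERDICT (by name: the statement is the Claim_ definition above) =====
theorem last_word_spec : Claim_equal_last_word := by
  intro s _ _
  unfold Spec_last_word last_word last_word_alt
  cases h : s.toList with
  | nil => rfl
  | cons c0 cs =>
    simp only [maxes_eq]
    have hm : pmScan c0 (c0 :: cs) = c0 :: pmScan c0 cs := by simp [pmScan]
    rw [List.nil_append, hm, zip_hi, zip_lo]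
    have := A_loop cs c0 [c0] [] rfl
    simp only [List.append_nil] at this
    rw [this]
    simp
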